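-- pv_equiv track=rewrite | github.com/krampslaag/Telegram-Python-Replit | core/utils.py | validate_solana_address
-- ===== SOURCE A (Python) =====
-- def validate_solana_address(address: str) -> bool:
--     """Validate Solana address format"""
--     if not address or not isinstance(address, str):
--         return False
--
--     # Basic validation: Solana addresses are base58 encoded and 32-44 characters
--     if len(address) < 32 or len(address) > 44:
--         return False
--
--     # Check for valid base58 characters
--     base58_chars = "123456789ABCDEFGHJKLMNPQRSTUVWXYZabcdefghijkmnopqrstuvwxyz"
--     for char in address:
--         if char not in base58_chars:
--             return False
--
--     return True
-- ===== SOURCE B (Python) =====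
-- import re
--
-- _B58_RE = re.compile(r'[1-9A-HJ-NP-Za-km-z]{32,44}')
--
-- def validate_solana_address(address: str) -> bool:
--     """Validate Solana address format"""
--     if not address or not isinstance(address, str):
--         return False
--     return bool(_B58_RE.fullmatch(address))
-- ===== Notes on version B (the rewrite author's own statement) =====
-- stated objective: idiomatic
-- what changed: Replaces the explicit length bounds and per-character membership loop over a base58 alphabet string with a single precompiled regex fullmatch whose character class and {32,44} quantifier encode the whole check.
import Mathlib
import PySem

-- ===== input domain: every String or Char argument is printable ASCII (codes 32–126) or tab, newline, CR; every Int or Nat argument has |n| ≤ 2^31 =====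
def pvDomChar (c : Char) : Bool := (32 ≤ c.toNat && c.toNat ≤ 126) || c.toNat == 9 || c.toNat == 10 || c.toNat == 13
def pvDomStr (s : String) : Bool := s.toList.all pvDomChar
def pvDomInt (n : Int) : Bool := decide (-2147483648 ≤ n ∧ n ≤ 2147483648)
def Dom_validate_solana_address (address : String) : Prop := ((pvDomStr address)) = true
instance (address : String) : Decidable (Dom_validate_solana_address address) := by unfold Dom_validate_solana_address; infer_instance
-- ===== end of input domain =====

-- B replaces A's explicit length checks and per-character alphabet-string scan with a
-- single regex-style check (length-in-[32,44] AND every char in the base58 character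
-- class), ported as one pass with a closed character-range predicate; objective: idiomatic.


-- ===== PORT A =====
-- base58_chars = "123456789ABCDEFGHJKLMNPQRSTUVWXYZabcdefghijkmnopqrstuvwxyz"
def pvBase58Chars : String := "123456789ABCDEFGHJKLMNPQRSTUVWXYZabcdefghijkmnopqrstuvwxyz"

-- "for char in address: if char not in base58_chars: return False" / "return True"
def pvScanA : List Char → Bool
  | [] => true
  | c :: rest => if !(pvBase58Chars.toList.contains c) then false else pvScanA rest

def validate_solana_address (address : String) : Bool :=
  -- "if not address or not isinstance(address, str)": isinstance is always true here
  if address.toList.length = 0 then false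
  else if address.toList.length < 32 ∨ address.toList.length > 44 then false
  else pvScanA address.toList

-- ===== PORT B =====
-- the regex character class [1-9A-HJ-NP-Za-km-z]
def pvB58Class (c : Char) : Bool :=
  ('1' ≤ c && c ≤ '9') || ('A' ≤ c && c ≤ 'H') || ('J' ≤ c && c ≤ 'N') ||
  ('P' ≤ c && c ≤ 'Z') || ('a' ≤ c && c ≤ 'k') || ('m' ≤ c && c ≤ 'z')

def validate_solana_address_alt (address : String) : Bool :=
  -- "if not address or not isinstance(address, str): return False"
  if address.toList.isEmpty then false
  else
    -- bool(_B58_RE.fullmatch(address)): {32,44} quantifier over the class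
    decide (32 ≤ address.toList.length ∧ address.toList.length ≤ 44)
      && address.toList.all pvB58Class

-- ===== PRECONDITION & SPEC =====
def Spec_validate_solana_address (address : String) (out : Bool) : Prop := out = validate_solana_address_alt address
instance (address : String) (out : Bool) : Decidable (Spec_validate_solana_address address out) := by unfold Spec_validate_solana_address; infer_instance

-- ===== CLAIM (what is proved, stated in full; the proofs are below) =====
def Claim_equal_validate_solana_address : Prop := ∀ (address : String), Dom_validate_solana_address address → Spec_validate_solana_address address (validate_solana_address address)

-- ===== LEMMAS AND PROOFS =====
theorem mem_b58 (c : Char) : pvBase58Chars.toList.contains c = pvB58Class c := by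
  have h : pvBase58Chars.toList = ['1', '2', '3', '4', '5', '6', '7', '8', '9', 'A', 'B', 'C', 'D', 'E', 'F', 'G', 'H', 'J', 'K', 'L', 'M', 'N', 'P', 'Q', 'R', 'S', 'T', 'U', 'V', 'W', 'X', 'Y', 'Z', 'a', 'b', 'c', 'd', 'e', 'f', 'g', 'h', 'i', 'j', 'k', 'm', 'n', 'o', 'p', 'q', 'r', 's', 't', 'u', 'v', 'w', 'x', 'y', 'z'] := by decide
  simp only [h, pvB58Class, List.contains_eq_mem, List.mem_cons, List.not_mem_nil, or_false]
  rw [Bool.eq_iff_iff]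
  simp [decide_eq_true_eq, Bool.or_eq_true, Bool.and_eq_true,
    Char.le_def, Char.ext_iff, UInt32.le_iff_toNat_le, UInt32.toNat_inj.symm]
  omega

theorem scanA_eq_all (l : List Char) : pvScanA l = l.all pvB58Class := by
  induction l with
  | nil => rfl
  | cons c rest ih =>
    simp only [pvScanA, List.all_cons, mem_b58, ih]
    cases pvB58Class c <;> simp

theorem validate_solana_address_spec : Claim_equal_validate_solana_address := by
  intro address _
  unfold Spec_validate_solana_address validate_solana_address validate_solana_address_alt
  simp only [scanA_eq_all, List.isEmpty_iff_length_eq_zero]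
  rcases Nat.eq_zero_or_pos address.toList.length with h0 | h0
  · simp [h0]
  · have hne : ¬(address = "") := by
      intro h; subst h; simp at h0
    have hL : address.toList.length = address.length := by simp
    rw [Bool.eq_iff_iff]
    by_cases ha : address.toList.all pvB58Class = true <;>
      simp [ha, hne, hL]
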